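-- pv_equiv track=rewrite | github.com/Knoekus/Carcassonne_online | files_lib/tile_data.py | add_triangle
-- ===== SOURCE A (Python) =====
-- data_steps = 7
--
-- def make_row(pairs, num_rows:int=1):
--     '''
--     pairs : tuple (mat_idx, reps)
--         Contains the mat_idx and number of repetitions to make a material data row.
--
--     num_rows : int (default = 1)
--         How many times should this row be repeated?'''
--
--     # Check
--     if type(pairs) == tuple:
--         pairs = [pairs]
--     elif type(pairs) != list:
--         raise Exception('pairs must be of type list or tuple.')
--
--     # Make row
--     row = list()
--     for mat_idx, reps in pairs:
--         row += [mat_idx for x in range(reps)]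
--
--     # Return
--     if num_rows == 1:
--         return row
--     else:
--         return [row for x in range(num_rows)]
--
-- def add_triangle(pos, mat_idx, data=None):
--     data_new = [[0 for col in range(data_steps)] for row in range(data_steps)]
--     if pos == 'NE':
--         data_new[0] = make_row([(mat_idx, 7)])
--         data_new[1] = make_row([(0, 3), (mat_idx, 4)])
--         data_new[2:4] = make_row([(0, 5), (mat_idx, 2)], 2)
--         data_new[4:] = make_row([(0, 6), (mat_idx, 1)], 3)
--     elif pos == 'SE':
--         data_new[:3] = make_row([(0, 6), (mat_idx, 1)], 3)
--         data_new[3:5] = make_row([(0, 5), (mat_idx, 2)], 2)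
--         data_new[5] = make_row([(0, 3), (mat_idx, 4)])
--         data_new[6] = make_row([(mat_idx, 7)])
--     elif pos == 'SW':
--         data_new[:3] = make_row([(mat_idx, 1), (0, 6)], 3)
--         data_new[3:5] = make_row([(mat_idx, 2), (0, 5)], 2)
--         data_new[5] = make_row([(mat_idx, 4), (0, 3)])
--         data_new[6] = make_row([(mat_idx, 7)])
--     elif pos == 'NW':
--         data_new[0] = make_row([(mat_idx, 7)])
--         data_new[1] = make_row([(mat_idx, 4), (0, 3)])
--         data_new[2:4] = make_row([(mat_idx, 2), (0, 5)], 2)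
--         data_new[4:] = make_row([(mat_idx, 1), (0, 6)], 3)
--
--     if data == None:
--         return data_new
--     else:
--         # Combine data
--         for row_idx in range(len(data)):
--             data[row_idx] = [data[row_idx][x]+data_new[row_idx][x] for x in range(len(data))]
--         return data
-- ===== SOURCE B (Python) =====
-- def add_triangle(pos, mat_idx, data=None):
--     # Per-cell closed form: reflect coordinates into the NE canonical frame and
--     # compare the column against a per-row threshold; the combine is fused in.
--     valid = pos in ('NE', 'SE', 'SW', 'NW')
--     flip_v = pos in ('SE', 'SW')
--     flip_h = pos in ('NW', 'SW')
--
--     def cell(r, c):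
--         if not valid:
--             return 0
--         rr = 6 - r if flip_v else r
--         cc = 6 - c if flip_h else c
--         return mat_idx if cc >= (0, 3, 5, 5, 6, 6, 6)[rr] else 0
--
--     if data is None:
--         return [[cell(r, c) for c in range(7)] for r in range(7)]
--     n = len(data)
--     for r in range(n):
--         data[r] = [data[r][c] + cell(r, c) for c in range(n)]
--     return data
-- ===== Notes on version B (the rewrite author's own statement) =====
-- stated objective: alternative
-- what changed: B computes each cell by a closed-form function (reflect (row,col) into the NE frame, compare the column to a per-row threshold) and, when data is given, adds that per-cell contribution directly in the combine pass without ever materializing the 7x7 grid, whereas A constructs the grid by concatenating material runs with make_row and slice assignments and then adds it in a second pass.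
import Mathlib
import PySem

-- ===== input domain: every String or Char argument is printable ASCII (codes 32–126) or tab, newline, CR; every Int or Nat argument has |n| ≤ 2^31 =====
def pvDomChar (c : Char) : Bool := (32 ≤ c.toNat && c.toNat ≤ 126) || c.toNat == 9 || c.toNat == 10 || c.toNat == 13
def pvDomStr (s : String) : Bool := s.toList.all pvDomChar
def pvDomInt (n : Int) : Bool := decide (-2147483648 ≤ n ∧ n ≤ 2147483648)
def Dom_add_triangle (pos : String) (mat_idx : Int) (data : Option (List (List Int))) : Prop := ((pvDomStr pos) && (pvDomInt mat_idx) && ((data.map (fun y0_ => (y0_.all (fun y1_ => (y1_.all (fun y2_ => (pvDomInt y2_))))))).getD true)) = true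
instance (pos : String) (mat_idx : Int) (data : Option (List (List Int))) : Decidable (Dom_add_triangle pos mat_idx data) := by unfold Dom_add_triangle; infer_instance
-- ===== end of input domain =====

-- B replaces A's make_row/slice-assignment grid construction by a closed-form per-cell
-- function (coordinate reflection + per-row threshold) fused into the combine pass
-- (objective: alternative). Both Pythons mutate `data` in place identically; the
-- theorems here are about the return value.

-- ===== PORT A =====
-- make_row(pairs): row = []; row += [mat_idx]*reps for each pair
def pvMakeRow (pairs : List (Int × Int)) : List Int :=
  pairs.foldl (fun row p => row ++ List.replicate p.2.toNat p.1) []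

-- make_row(pairs, num_rows>1): [row]*num_rows
def pvMakeRows (pairs : List (Int × Int)) (numRows : Nat) : List (List Int) :=
  List.replicate numRows (pvMakeRow pairs)

-- data_new[a:b] = L  (b is the slice's upper bound already clamped to 7 at the call sites)
def pvSliceAssign (xs : List (List Int)) (a b : Nat) (L : List (List Int)) : List (List Int) :=
  xs.take a ++ L ++ xs.drop b

-- the data_new grid A builds before the `if data == None` branch
def pvGridA (pos : String) (mat_idx : Int) : List (List Int) :=
  let dn : List (List Int) := (List.range 7).map (fun _ => (List.range 7).map (fun _ => (0:Int)))
  if pos = "NE" then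
    (((dn.set 0 (pvMakeRow [(mat_idx, 7)])).set 1 (pvMakeRow [(0, 3), (mat_idx, 4)]))
      |> (fun d => pvSliceAssign d 2 4 (pvMakeRows [(0, 5), (mat_idx, 2)] 2)))
      |> (fun d => pvSliceAssign d 4 7 (pvMakeRows [(0, 6), (mat_idx, 1)] 3))
  else if pos = "SE" then
    (((pvSliceAssign dn 0 3 (pvMakeRows [(0, 6), (mat_idx, 1)] 3))
      |> (fun d => pvSliceAssign d 3 5 (pvMakeRows [(0, 5), (mat_idx, 2)] 2))).set 5
        (pvMakeRow [(0, 3), (mat_idx, 4)])).set 6 (pvMakeRow [(mat_idx, 7)])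
  else if pos = "SW" then
    (((pvSliceAssign dn 0 3 (pvMakeRows [(mat_idx, 1), (0, 6)] 3))
      |> (fun d => pvSliceAssign d 3 5 (pvMakeRows [(mat_idx, 2), (0, 5)] 2))).set 5
        (pvMakeRow [(mat_idx, 4), (0, 3)])).set 6 (pvMakeRow [(mat_idx, 7)])
  else if pos = "NW" then
    (((dn.set 0 (pvMakeRow [(mat_idx, 7)])).set 1 (pvMakeRow [(mat_idx, 4), (0, 3)]))
      |> (fun d => pvSliceAssign d 2 4 (pvMakeRows [(mat_idx, 2), (0, 5)] 2)))
      |> (fun d => pvSliceAssign d 4 7 (pvMakeRows [(mat_idx, 1), (0, 6)] 3))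
  else dn

def add_triangle (pos : String) (mat_idx : Int) (data : Option (List (List Int))) : List (List Int) :=
  let dn := pvGridA pos mat_idx
  match data with
  | none => dn
  | some d =>
    -- for row_idx in range(len(data)): data[row_idx] = [data[row_idx][x]+data_new[row_idx][x] for x in range(len(data))]
    (List.range d.length).foldl (fun dd r =>
      dd.set r ((List.range d.length).map (fun x =>
        ((dd.getD r []).getD x 0) + ((dn.getD r []).getD x 0)))) d

-- ===== PORT B =====
-- cell(r, c): reflect into the NE frame, compare the column against a per-row threshold
def pvCellB (pos : String) (mat_idx : Int) (r c : Nat) : Int :=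
  if pos = "NE" ∨ pos = "SE" ∨ pos = "SW" ∨ pos = "NW" then
    let rr := if pos = "SE" ∨ pos = "SW" then 6 - r else r
    let cc := if pos = "NW" ∨ pos = "SW" then 6 - c else c
    if ([0, 3, 5, 5, 6, 6, 6] : List Nat).getD rr 0 ≤ cc then mat_idx else 0
  else 0

def add_triangle_alt (pos : String) (mat_idx : Int) (data : Option (List (List Int))) : List (List Int) :=
  match data with
  | none => (List.range 7).map (fun r => (List.range 7).map (fun c => pvCellB pos mat_idx r c))
  | some d =>
    -- for r in range(n): data[r] = [data[r][c] + cell(r, c) for c in range(n)]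
    (List.range d.length).foldl (fun dd r =>
      dd.set r ((List.range d.length).map (fun c =>
        ((dd.getD r []).getD c 0) + pvCellB pos mat_idx r c))) d

-- ===== PRECONDITION & SPEC =====
-- Pre_ excludes exactly the inputs on which Python A raises IndexError in the combine loop:
-- data given with more than 7 rows, or with some row shorter than len(data).
def Pre_add_triangle (pos : String) (mat_idx : Int) (data : Option (List (List Int))) : Prop :=
  ∀ d ∈ data, d.length ≤ 7 ∧ ∀ row ∈ d, d.length ≤ row.length
instance (pos : String) (mat_idx : Int) (data : Option (List (List Int))) : Decidable (Pre_add_triangle pos mat_idx data) := by unfold Pre_add_triangle; infer_instance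

def pvWitness_add_triangle : String × Int × Option (List (List Int)) := ("NE", 2, some [[1, 2], [3, 4]])

def Spec_add_triangle (pos : String) (mat_idx : Int) (data : Option (List (List Int))) (out : List (List Int)) : Prop := out = add_triangle_alt pos mat_idx data
instance (pos : String) (mat_idx : Int) (data : Option (List (List Int))) (out : List (List Int)) : Decidable (Spec_add_triangle pos mat_idx data out) := by unfold Spec_add_triangle; infer_instance

-- ===== CLAIM =====
def Claim_equal_add_triangle : Prop := ∀ (pos : String) (mat_idx : Int) (data : Option (List (List Int))), Dom_add_triangle pos mat_idx data → Pre_add_triangle pos mat_idx data → Spec_add_triangle pos mat_idx data (add_triangle pos mat_idx data)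

-- ===== LEMMAS AND PROOFS =====

-- A's grid is the tabulation of B's per-cell function
theorem pvGridA_eq (pos : String) (mat_idx : Int) :
    pvGridA pos mat_idx = (List.range 7).map (fun r => (List.range 7).map (fun c => pvCellB pos mat_idx r c)) := by
  by_cases h1 : pos = "NE"
  · subst h1; rfl
  by_cases h2 : pos = "SE"
  · subst h2; rfl
  by_cases h3 : pos = "SW"
  · subst h3; rfl
  by_cases h4 : pos = "NW"
  · subst h4; rfl
  simp [pvGridA, pvCellB, h1, h2, h3, h4, List.range_succ]

theorem getD_map_range {α : Type} (g : Nat → α) (n r : Nat) (hr : r < n) (d : α) :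
    ((List.range n).map g).getD r d = g r := by
  rw [List.getD_eq_getElem?_getD]
  simp [hr]

theorem pvCell_from_grid (pos : String) (mat_idx : Int) (r c : Nat) (hr : r < 7) (hc : c < 7) :
    ((pvGridA pos mat_idx).getD r []).getD c 0 = pvCellB pos mat_idx r c := by
  rw [pvGridA_eq, getD_map_range _ 7 r hr, getD_map_range _ 7 c hc]

-- ===== VERDICT =====
theorem add_triangle_spec : Claim_equal_add_triangle := by
  intro pos mat_idx data _ hpre
  unfold Spec_add_triangle add_triangle add_triangle_alt
  match data with
  | none => simpa using (pvGridA_eq pos mat_idx)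
  | some d =>
    obtain ⟨hlen, _⟩ := hpre d rfl
    simp only
    apply PySem.List.foldl_congr_mem
    intro dd r hr
    have hr7 : r < 7 := lt_of_lt_of_le (List.mem_range.mp hr) hlen
    congr 1
    apply List.map_congr_left
    intro c hc
    have hc7 : c < 7 := lt_of_lt_of_le (List.mem_range.mp hc) hlen
    rw [pvCell_from_grid pos mat_idx r c hr7 hc7]
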